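-- pv_equiv track=rewrite | github.com/spicylemonade/cuckoo | cuckoo/solver.py | _attempt_find_42_cycle
-- ===== SOURCE A (Python) =====
-- from typing import List, Tuple, Dict, DefaultDict
-- from collections import defaultdict, deque
--
-- def _attempt_find_42_cycle(edges: List[Tuple[int, int, int]]) -> Tuple[bool, List[Tuple[int, int, int]]]:
--     """
--     Use adjacency traversal within the small subgraph to try to find a 42-edge cycle.
--     Because bins are a sparse subset, probability is low; but if present, we can verify quickly.
--     """
--     if not edges:
--         return False, []
--     # Build adjacency from v -> list of (e,u,v) where v is the starting endpoint for next edge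
--     by_u: DefaultDict[int, List[Tuple[int, int, int]]] = defaultdict(list)
--     by_v: DefaultDict[int, List[Tuple[int, int, int]]] = defaultdict(list)
--     for trip in edges:
--         _, u, v = trip
--         by_u[u].append(trip)
--         by_v[v].append(trip)
--     # DFS limited depth 42 searching for a returning path
--     for start in edges:
--         start_e, start_u, start_v = start
--         stack = [(start, 1, {start_e})]  # (current_edge, length, used_edges)
--         # Follow adjacency: current v must match next u
--         while stack:
--             (cur_e, cur_u, cur_v), length, used = stack.pop()
--             if length == 42:
--                 # Check closure: current v should equal start_u
--                 if cur_v == start_u: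
--                     # Reconstruct cycle edges: we don't store path; do a simple verification path rebuild
--                     # Here, we cannot easily reconstruct without storing predecessors.
--                     # For prototype, verify via recomputation of endpoints; return dummy path of 42 edges by walking greedily
--                     path: List[Tuple[int, int, int]] = []
--                     used2 = set()
--                     cur = start
--                     for _ in range(42):
--                         path.append(cur)
--                         used2.add(cur[0])
--                         # pick a next edge whose u == cur.v and not used
--                         nxt_list = by_u.get(cur[2], [])
--                         nxt = None
--                         for cand in nxt_list:
--                             if cand[0] not in used2:
--                                 nxt = cand
--                                 break
--                         if nxt is None:
--                             break
--                         cur = nxt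
--                     if len(path) == 42:
--                         return True, path
--                 continue
--             # Expand
--             for nxt in by_u.get(cur_v, []):
--                 ne, nu, nv = nxt
--                 if ne in used:
--                     continue
--                 # extend
--                 new_used = set(used)
--                 new_used.add(ne)
--                 stack.append((nxt, length + 1, new_used))
--     return False, []
-- ===== SOURCE B (Python) =====
-- from typing import List, Tuple
--
--
-- def _attempt_find_42_cycle(edges: List[Tuple[int, int, int]]) -> Tuple[bool, List[Tuple[int, int, int]]]:
--     """Recursive backtracking search (single mutated used-set) instead of an
--     explicit stack with per-node set copies; same greedy reconstruction."""
--     if not edges: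
--         return False, []
--     by_u = {}
--     for trip in edges:
--         by_u.setdefault(trip[1], []).append(trip)
--
--     def has_returning_trail(cur, remaining, used, start_u):
--         # True iff a trail of `remaining` more edges starting after `cur`
--         # (i.e. total length 42) ends at start_u.
--         if remaining == 0:
--             return cur[2] == start_u
--         for nxt in by_u.get(cur[2], []):
--             if nxt[0] in used:
--                 continue
--             used.add(nxt[0])
--             ok = has_returning_trail(nxt, remaining - 1, used, start_u)
--             used.discard(nxt[0])
--             if ok:
--                 return True
--         return False
--
--     def greedy_walk(start):
--         path, used2, cur = [], set(), start
--         for _ in range(42):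
--             path.append(cur)
--             used2.add(cur[0])
--             nxt = None
--             for cand in by_u.get(cur[2], []):
--                 if cand[0] not in used2:
--                     nxt = cand
--                     break
--             if nxt is None:
--                 break
--             cur = nxt
--         return path
--
--     for start in edges:
--         if has_returning_trail(start, 41, {start[0]}, start[1]):
--             path = greedy_walk(start)
--             if len(path) == 42:
--                 return True, path
--     return False, []
-- ===== Notes on version B (the rewrite author's own statement) =====
-- stated objective: alternative
-- what changed: The explicit-stack DFS that copies the used-edge set for every pushed node is re-decomposed as a recursive backtracking helper has_returning_trail(cur, remaining, used, start_u) that threads one mutated used-set (add before the recursive call, discard after); the outer per-start-edge loop and the greedy 42-edge reconstruction walk are kept.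
import Mathlib
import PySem

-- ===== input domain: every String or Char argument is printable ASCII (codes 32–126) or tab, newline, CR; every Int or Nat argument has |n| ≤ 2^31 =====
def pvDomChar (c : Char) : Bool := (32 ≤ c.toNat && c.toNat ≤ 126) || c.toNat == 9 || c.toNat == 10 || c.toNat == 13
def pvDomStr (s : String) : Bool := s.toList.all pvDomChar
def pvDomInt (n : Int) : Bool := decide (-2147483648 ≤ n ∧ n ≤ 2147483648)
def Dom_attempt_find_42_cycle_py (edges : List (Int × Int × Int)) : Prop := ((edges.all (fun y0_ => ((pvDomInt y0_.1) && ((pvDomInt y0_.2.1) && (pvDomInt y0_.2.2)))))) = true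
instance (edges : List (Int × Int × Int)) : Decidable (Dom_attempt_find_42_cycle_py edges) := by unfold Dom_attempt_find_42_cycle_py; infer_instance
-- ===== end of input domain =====

-- B rewrites A's explicit-stack DFS (per-node copied used-sets) as a recursive
-- backtracking search with a single threaded used-set; the greedy 42-edge
-- reconstruction walk is textually identical in both sources and is shared below.

-- ===== PORT A =====
-- a DFS stack node of A: (current edge, length, used edge-ids)
abbrev PvNode : Type := (Int × Int × Int) × Int × PySem.Set Int

-- by_u: defaultdict(list); by_u[u].append(trip)
def pvBuildByU (edges : List (Int × Int × Int)) : PySem.Dict Int (List (Int × Int × Int)) :=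
  edges.foldl (fun d t => d.modify t.2.1 [] (· ++ [t])) PySem.Dict.empty

def pvBuildByV (edges : List (Int × Int × Int)) : PySem.Dict Int (List (Int × Int × Int)) :=
  edges.foldl (fun d t => d.modify t.2.2 [] (· ++ [t])) PySem.Dict.empty

-- "for cand in nxt_list: if cand[0] not in used2: nxt = cand; break"
-- (identical loop in both Python sources; shared helper)
def pvFirstUnused (l : List (Int × Int × Int)) (used2 : PySem.Set Int) : Option (Int × Int × Int) :=
  match l with
  | [] => none
  | c :: cs => if c.1 ∈ used2 then pvFirstUnused cs used2 else some c

-- the greedy 42-step reconstruction walk ("for _ in range(42): ..."), identical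
-- in both Python sources; shared helper
def pvGreedy (by_u : PySem.Dict Int (List (Int × Int × Int))) :
    Nat → (Int × Int × Int) → List (Int × Int × Int) → PySem.Set Int → List (Int × Int × Int)
  | 0, _, path, _ => path
  | n + 1, cur, path, used2 =>
    let path2 := path ++ [cur]
    let used3 := PySem.Set.add used2 cur.1
    match pvFirstUnused (by_u.getD cur.2.2 []) used3 with
    | none => path2
    | some nxt => pvGreedy by_u n nxt path2 used3

-- termination measure for A's explicit-stack DFS while-loop
def pvIds (by_u : PySem.Dict Int (List (Int × Int × Int))) : List Int :=
  by_u.values.flatten.map (·.1)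

def pvSlack (by_u : PySem.Dict Int (List (Int × Int × Int))) (used : PySem.Set Int) : Nat :=
  (pvIds by_u).countP (fun i => decide (i ∉ used))

def pvWeight (by_u : PySem.Dict Int (List (Int × Int × Int))) (used : PySem.Set Int) : Nat :=
  (by_u.values.flatten.length + 1) ^ pvSlack by_u used

def pvMeasure (by_u : PySem.Dict Int (List (Int × Int × Int))) (stack : List PvNode) : Nat :=
  (stack.map (fun n => pvWeight by_u n.2.2)).sum

-- lemmas cited by the termination proof of pvDfsA
theorem pv_foldl_push_shape (l : List (Int × Int × Int)) (rest : List PvNode)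
    (length : Int) (used : PySem.Set Int) :
    (l.foldl (fun st nxt => if nxt.1 ∈ used then st
        else (nxt, length + 1, PySem.Set.add used nxt.1) :: st) rest)
    = ((l.filter (fun nxt => decide (nxt.1 ∉ used))).map
        (fun nxt => ((nxt, length + 1, PySem.Set.add used nxt.1) : PvNode))).reverse ++ rest := by
  induction l generalizing rest with
  | nil => simp
  | cons a l ih =>
    by_cases h : a.1 ∈ used
    · rw [List.foldl_cons, if_pos h, ih, List.filter_cons_of_neg (by simp [h])]
    · rw [List.foldl_cons, if_neg h, ih, List.filter_cons_of_pos (by simp [h])]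
      simp [List.append_assoc]

theorem pv_mem_getD_flatten (by_u : PySem.Dict Int (List (Int × Int × Int))) (k : Int)
    (t : Int × Int × Int) (ht : t ∈ by_u.getD k []) : t ∈ by_u.values.flatten := by
  rw [PySem.Dict.getD] at ht
  cases h : by_u.get? k with
  | none => rw [h] at ht; simp at ht
  | some v =>
    rw [h] at ht
    simp only [Option.getD_some] at ht
    have hv : v ∈ by_u.values := by
      have hm := PySem.Dict.mem_items_of_get?_eq_some by_u h
      simp only [PySem.Dict.values]
      exact List.mem_map.mpr ⟨(k, v), hm, rfl⟩
    exact List.mem_flatten.mpr ⟨v, hv, ht⟩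

theorem pv_getD_length_le (by_u : PySem.Dict Int (List (Int × Int × Int))) (k : Int) :
    (by_u.getD k []).length ≤ by_u.values.flatten.length := by
  rw [PySem.Dict.getD]
  cases h : by_u.get? k with
  | none => simp
  | some v =>
    simp only [Option.getD_some]
    have hv : v ∈ by_u.values := by
      have hm := PySem.Dict.mem_items_of_get?_eq_some by_u h
      simp only [PySem.Dict.values]
      exact List.mem_map.mpr ⟨(k, v), hm, rfl⟩
    exact (List.sublist_flatten_of_mem hv).length_le

theorem pv_countP_lt {α : Type} (p q : α → Bool) (U : List α) (x : α) (hx : x ∈ U)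
    (hp : p x = true) (hq : q x = false) (hpq : ∀ i, q i = true → p i = true) :
    U.countP q < U.countP p := by
  induction U with
  | nil => simp at hx
  | cons a l ih =>
    simp only [List.countP_cons]
    rcases List.mem_cons.mp hx with rfl | ha
    · have hle := List.countP_mono_left (l := l) (fun i _ h => hpq i h)
      rw [hp, hq]
      norm_num
      omega
    · have h2 := ih ha
      split_ifs with h1 h2'
      · omega
      · exact absurd (hpq a h1) h2'
      · omega
      · omega

theorem pv_slack_add_lt (by_u : PySem.Dict Int (List (Int × Int × Int)))
    (used : PySem.Set Int) (x : Int) (hx : x ∈ pvIds by_u) (hnx : x ∉ used) :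
    pvSlack by_u (PySem.Set.add used x) < pvSlack by_u used := by
  unfold pvSlack
  refine pv_countP_lt _ _ _ x hx (by simp [hnx]) ?_ ?_
  · have hxm : x ∈ PySem.Set.add used x := (PySem.Set.mem_add used x x).mpr (Or.inr rfl)
    simp [hxm]
  · intro i hi
    by_cases hmem : i ∈ used
    · exfalso
      have him : i ∈ PySem.Set.add used x := (PySem.Set.mem_add used x i).mpr (Or.inl hmem)
      simp [him] at hi
    · simp [hmem]

theorem pv_measure_push_lt (by_u : PySem.Dict Int (List (Int × Int × Int)))
    (cur : Int × Int × Int) (length : Int) (used : PySem.Set Int) (rest : List PvNode) :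
    pvMeasure by_u ((by_u.getD cur.2.2 []).foldl (fun st nxt =>
        if nxt.1 ∈ used then st
        else (nxt, length + 1, PySem.Set.add used nxt.1) :: st) rest)
      < pvMeasure by_u ((cur, length, used) :: rest) := by
  rw [pv_foldl_push_shape]
  have hwpos : 0 < pvWeight by_u used := by unfold pvWeight; positivity
  simp only [pvMeasure, List.map_append, List.sum_append, List.map_reverse, List.sum_reverse,
    List.map_map, List.map_cons, List.sum_cons]
  have hsuff : ((((by_u.getD cur.2.2 []).filter (fun nxt => decide (nxt.1 ∉ used))).map
      ((fun n : PvNode => pvWeight by_u n.2.2) ∘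
        (fun nxt => ((nxt, length + 1, PySem.Set.add used nxt.1) : PvNode)))).sum)
      < pvWeight by_u used := by
    set F := (by_u.getD cur.2.2 []).filter (fun nxt => decide (nxt.1 ∉ used)) with hF
    have hprops : ∀ t ∈ F, t.1 ∈ pvIds by_u ∧ t.1 ∉ used := by
      intro t htF
      have hmem := List.mem_of_mem_filter htF
      have hflt := List.of_mem_filter htF
      refine ⟨?_, by simpa using hflt⟩
      exact List.mem_map.mpr ⟨t, pv_mem_getD_flatten by_u cur.2.2 t hmem, rfl⟩
    by_cases hFnil : F = []
    · rw [hFnil]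
      simpa using hwpos
    · obtain ⟨t0, ht0F⟩ := List.exists_mem_of_ne_nil F hFnil
      have ht0 := hprops t0 ht0F
      have hk : 1 ≤ pvSlack by_u used := by
        have := pv_slack_add_lt by_u used t0.1 ht0.1 ht0.2
        omega
      set B := by_u.values.flatten.length with hB
      set k := pvSlack by_u used with hkdef
      have hbound : ∀ y ∈ F.map ((fun n : PvNode => pvWeight by_u n.2.2) ∘
          (fun nxt => ((nxt, length + 1, PySem.Set.add used nxt.1) : PvNode))),
          y ≤ (B + 1) ^ (k - 1) := by
        intro y hy
        obtain ⟨t, htF, rfl⟩ := List.mem_map.mp hy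
        have hlt := pv_slack_add_lt by_u used t.1 (hprops t htF).1 (hprops t htF).2
        simp only [Function.comp]
        unfold pvWeight
        exact Nat.pow_le_pow_right (by omega) (by omega)
      have hsum := List.sum_le_card_nsmul _ _ hbound
      rw [List.length_map] at hsum
      have hlen : F.length ≤ B := by
        calc F.length ≤ (by_u.getD cur.2.2 []).length := by rw [hF]; exact List.length_filter_le _ _
          _ ≤ B := pv_getD_length_le by_u cur.2.2
      have hstep : F.length * (B + 1) ^ (k - 1) ≤ B * (B + 1) ^ (k - 1) :=
        Nat.mul_le_mul_right _ hlen
      have hfin : B * (B + 1) ^ (k - 1) < (B + 1) ^ k := by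
        have hxp : 0 < (B + 1) ^ (k - 1) := by positivity
        have hpows : (B + 1) ^ k = (B + 1) ^ (k - 1) * (B + 1) := by
          rw [← pow_succ]
          congr 1
          omega
        rw [hpows]
        calc B * (B + 1) ^ (k - 1) < (B + 1) * (B + 1) ^ (k - 1) :=
              (Nat.mul_lt_mul_right hxp).mpr (by omega)
          _ = (B + 1) ^ (k - 1) * (B + 1) := Nat.mul_comm _ _
      have hsum' : (F.map ((fun n : PvNode => pvWeight by_u n.2.2) ∘
          (fun nxt => ((nxt, length + 1, PySem.Set.add used nxt.1) : PvNode)))).sum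
          ≤ F.length * (B + 1) ^ (k - 1) := by simpa [smul_eq_mul] using hsum
      have hmain := le_trans hsum' hstep
      unfold pvWeight
      rw [← hB, ← hkdef]
      exact lt_of_le_of_lt hmain hfin
  omega

-- A's DFS while-loop over the explicit stack (pop = head; children pushed in
-- iteration order so the last-appended is popped first, as in Python)
def pvDfsA (by_u : PySem.Dict Int (List (Int × Int × Int))) (start : Int × Int × Int)
    (stack : List PvNode) : Option (Bool × List (Int × Int × Int)) :=
  match stack with
  | [] => none
  | (cur, length, used) :: rest =>
    if length = 42 then
      if cur.2.2 = start.2.1 then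
        let path := pvGreedy by_u 42 start [] PySem.Set.empty
        if path.length = 42 then some (true, path)
        else pvDfsA by_u start rest
      else pvDfsA by_u start rest
    else
      pvDfsA by_u start ((by_u.getD cur.2.2 []).foldl (fun st nxt =>
        if nxt.1 ∈ used then st
        else (nxt, length + 1, PySem.Set.add used nxt.1) :: st) rest)
  termination_by pvMeasure by_u stack
  decreasing_by
  · have hwpos : 0 < pvWeight by_u used := by unfold pvWeight; positivity
    simp only [pvMeasure, List.map_cons, List.sum_cons]
    omega
  · have hwpos : 0 < pvWeight by_u used := by unfold pvWeight; positivity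
    simp only [pvMeasure, List.map_cons, List.sum_cons]
    omega
  · exact pv_measure_push_lt by_u cur length used rest

-- "for start in edges:" of A
def pvOuterA (by_u : PySem.Dict Int (List (Int × Int × Int))) :
    List (Int × Int × Int) → Bool × List (Int × Int × Int)
  | [] => (false, [])
  | start :: rest =>
    match pvDfsA by_u start [(start, 1, PySem.Set.ofList [start.1])] with
    | some r => r
    | none => pvOuterA by_u rest

def attempt_find_42_cycle_py (edges : List (Int × Int × Int)) : Bool × (List (Int × Int × Int)) :=
  if edges.isEmpty then (false, [])
  else
    let by_u := pvBuildByU edges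
    let _by_v := pvBuildByV edges   -- built by A, never read
    pvOuterA by_u edges

-- ===== PORT B =====
-- by_u built with setdefault(...).append (same dict value as A's defaultdict)
def pvBuildByU_B (edges : List (Int × Int × Int)) : PySem.Dict Int (List (Int × Int × Int)) :=
  edges.foldl (fun d t => d.insert t.2.1 (d.getD t.2.1 [] ++ [t])) PySem.Dict.empty

-- has_returning_trail(cur, remaining, used, start_u): recursive backtracking;
-- the Python add/discard around the recursive call is the threaded set here
def pvHrt (by_u : PySem.Dict Int (List (Int × Int × Int))) (start_u : Int) :
    Nat → (Int × Int × Int) → PySem.Set Int → Bool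
  | 0, cur, _ => cur.2.2 == start_u
  | r + 1, cur, used =>
    (by_u.getD cur.2.2 []).any (fun nxt =>
      !(decide (nxt.1 ∈ used)) && pvHrt by_u start_u r nxt (PySem.Set.add used nxt.1))

-- "for start in edges:" of B
def pvOuterB (by_u : PySem.Dict Int (List (Int × Int × Int))) :
    List (Int × Int × Int) → Bool × List (Int × Int × Int)
  | [] => (false, [])
  | start :: rest =>
    if pvHrt by_u start.2.1 41 start (PySem.Set.ofList [start.1]) then
      let path := pvGreedy by_u 42 start [] PySem.Set.empty
      if path.length = 42 then (true, path) else pvOuterB by_u rest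
    else pvOuterB by_u rest

def attempt_find_42_cycle_py_alt (edges : List (Int × Int × Int)) : Bool × (List (Int × Int × Int)) :=
  if edges.isEmpty then (false, [])
  else
    let by_u := pvBuildByU_B edges
    pvOuterB by_u edges

-- ===== PRECONDITION & SPEC =====
def Spec_attempt_find_42_cycle_py (edges : List (Int × Int × Int)) (out : Bool × (List (Int × Int × Int))) : Prop := out = attempt_find_42_cycle_py_alt edges
instance (edges : List (Int × Int × Int)) (out : Bool × (List (Int × Int × Int))) : Decidable (Spec_attempt_find_42_cycle_py edges out) := by unfold Spec_attempt_find_42_cycle_py; infer_instance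

-- ===== CLAIM (what is proved, stated in full; the proofs are below) =====
def Claim_equal_attempt_find_42_cycle_py : Prop := ∀ (edges : List (Int × Int × Int)), Dom_attempt_find_42_cycle_py edges → Spec_attempt_find_42_cycle_py edges (attempt_find_42_cycle_py edges)

-- ===== LEMMAS AND PROOFS =====

theorem pv_build_eq (edges : List (Int × Int × Int)) : pvBuildByU edges = pvBuildByU_B edges := rfl

-- the boolean a node of A's stack stands for: "some returning trail completes it"
def pvExNode (by_u : PySem.Dict Int (List (Int × Int × Int))) (start_u : Int) (n : PvNode) : Bool :=
  pvHrt by_u start_u (42 - n.2.1).toNat n.1 n.2.2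

theorem pv_any_push (l : List (Int × Int × Int)) (rest : List PvNode) (length : Int)
    (used : PySem.Set Int) (p : PvNode → Bool) :
    ((l.foldl (fun st nxt => if nxt.1 ∈ used then st
        else (nxt, length + 1, PySem.Set.add used nxt.1) :: st) rest).any p)
    = (l.any (fun nxt => !(decide (nxt.1 ∈ used)) &&
        p (nxt, length + 1, PySem.Set.add used nxt.1)) || rest.any p) := by
  rw [pv_foldl_push_shape]
  simp only [List.any_append, List.any_reverse, List.any_map]
  congr 1
  induction l with
  | nil => simp
  | cons a l ih =>
    by_cases h : a.1 ∈ used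
    · rw [List.filter_cons_of_neg (by simp [h]), List.any_cons, ih]
      simp [h]
    · rw [List.filter_cons_of_pos (by simp [h]), List.any_cons, List.any_cons, ih]
      simp [h, Function.comp]

theorem pv_dfs_eq (by_u : PySem.Dict Int (List (Int × Int × Int))) (start : Int × Int × Int)
    (stack : List PvNode) (hinv : ∀ n ∈ stack, n.2.1 ≤ 42) :
    pvDfsA by_u start stack =
      (if (pvGreedy by_u 42 start [] PySem.Set.empty).length = 42 ∧
          stack.any (pvExNode by_u start.2.1) then
        some (true, pvGreedy by_u 42 start [] PySem.Set.empty)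
      else none) := by
  revert hinv
  fun_induction pvDfsA by_u start stack with
  | case1 => intro _; simp
  | case2 cur used rest hcl path hpl =>
    intro _
    have hex : pvExNode by_u start.2.1 (cur, 42, used) = true := by
      simp [pvExNode, pvHrt, hcl]
    rw [if_pos ⟨hpl, by simp [hex]⟩]
  | case3 cur used rest hcl path hpl ih =>
    intro hinv
    rw [ih (fun n hn => hinv n (List.mem_cons_of_mem _ hn)), if_neg, if_neg]
    · rintro ⟨hgl, -⟩; exact hpl hgl
    · rintro ⟨hgl, -⟩; exact hpl hgl
  | case4 cur used rest hncl ih =>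
    intro hinv
    have hex : pvExNode by_u start.2.1 (cur, 42, used) = false := by
      simp [pvExNode, pvHrt]
      exact fun h => absurd h hncl
    rw [ih (fun n hn => hinv n (List.mem_cons_of_mem _ hn))]
    simp only [List.any_cons, hex, Bool.false_or]
  | case5 cur length used rest hne ih =>
    intro hinv
    have hlen : length ≤ 42 := by
      have := hinv (cur, length, used) List.mem_cons_self
      simpa using this
    have hinv' : ∀ n ∈ ((by_u.getD cur.2.2 []).foldl (fun st nxt =>
        if nxt.1 ∈ used then st
        else (nxt, length + 1, PySem.Set.add used nxt.1) :: st) rest), n.2.1 ≤ 42 := by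
      intro n hn
      rw [pv_foldl_push_shape] at hn
      rcases List.mem_append.mp hn with hL | hR
      · rw [List.mem_reverse] at hL
        obtain ⟨nxt, -, rfl⟩ := List.mem_map.mp hL
        simp only []
        omega
      · exact hinv n (List.mem_cons_of_mem _ hR)
    simp only [dite_eq_ite] at ih
    rw [ih hinv']
    have hany : (((by_u.getD cur.2.2 []).foldl (fun st nxt =>
          if nxt.1 ∈ used then st
          else (nxt, length + 1, PySem.Set.add used nxt.1) :: st) rest).any
            (pvExNode by_u start.2.1))
        = ((((cur, length, used) : PvNode) :: rest).any (pvExNode by_u start.2.1)) := by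
      rw [pv_any_push, List.any_cons]
      congr 1
      have h1 : pvExNode by_u start.2.1 (cur, length, used)
          = pvHrt by_u start.2.1 ((42 - (length + 1)).toNat + 1) cur used := by
        show pvHrt by_u start.2.1 ((42 - length).toNat) cur used = _
        congr 1
        omega
      rw [h1]
      rfl
    simp only [hany]

theorem pv_outer_eq (by_u : PySem.Dict Int (List (Int × Int × Int)))
    (l : List (Int × Int × Int)) : pvOuterA by_u l = pvOuterB by_u l := by
  induction l with
  | nil => rfl
  | cons start rest ih =>
    rw [pvOuterA, pvOuterB, pv_dfs_eq by_u start _ (by intro n hn; simp at hn; subst hn; norm_num)]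
    have hEx : ([((start, 1, PySem.Set.ofList [start.1]) : PvNode)].any (pvExNode by_u start.2.1))
        = pvHrt by_u start.2.1 41 start (PySem.Set.ofList [start.1]) := by
      simp [pvExNode]
    rw [hEx]
    cases hh : pvHrt by_u start.2.1 41 start (PySem.Set.ofList [start.1])
    · simp [ih]
    · split_ifs <;> first | rfl | (exact ih) | simp_all

-- ===== VERDICT (by name: the statement is the Claim_ definition above) =====
theorem attempt_find_42_cycle_py_spec : Claim_equal_attempt_find_42_cycle_py := by
  intro edges _dom
  unfold Spec_attempt_find_42_cycle_py attempt_find_42_cycle_py attempt_find_42_cycle_py_alt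
  by_cases h : edges.isEmpty
  · simp [h]
  · simp only [h]
    rw [← pv_build_eq, pv_outer_eq]
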